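-- pv_equiv track=rewrite | github.com/hyeonjun/AlgorithmTest | ProGrammers/Lv3/level_3_Overtime_Index.py | solution
-- ===== SOURCE A (Python) =====
-- def solution(works, n): # max를 사용하면 효율성에 문제 발생
--     if sum(works) <= n:
--         return 0
--     for i in range(n):
--         maxV = max(works)
--         idx = works.index(maxV)
--         works[idx] -= 1
--
--     return sum([i ** 2 for i in works])
-- ===== SOURCE B (Python) =====
-- def solution(works, n):
--     # Binary search on the final "level" t instead of n repeated max-scans (a different algorithm).
--     # NOTE: unlike A, this does not mutate `works` in place (return value is the same).
--     total = sum(works)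
--     if total <= n:
--         return 0
--     if n <= 0:
--         return sum(w * w for w in works)
--     hi = max(works)
--     lo = hi - n
--     while lo < hi:
--         mid = (lo + hi) // 2
--         if sum(w - mid for w in works if w > mid) <= n:
--             hi = mid
--         else:
--             lo = mid + 1
--     t = lo
--     r = n - sum(w - t for w in works if w > t)
--     c = sum(1 for w in works if w >= t)
--     return (sum(w * w for w in works if w < t)
--             + (c - r) * t * t + r * (t - 1) * (t - 1))
-- ===== Notes on version B (the rewrite author's own statement) =====
-- stated objective: alternative
-- what changed: Instead of n passes each scanning the list for its maximum and decrementing it, B binary-searches the final level t (the value the repeated max-decrements flatten the list to), computes how many decrements remain, and evaluates the sum of squares from t in closed form.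
import Mathlib
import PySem

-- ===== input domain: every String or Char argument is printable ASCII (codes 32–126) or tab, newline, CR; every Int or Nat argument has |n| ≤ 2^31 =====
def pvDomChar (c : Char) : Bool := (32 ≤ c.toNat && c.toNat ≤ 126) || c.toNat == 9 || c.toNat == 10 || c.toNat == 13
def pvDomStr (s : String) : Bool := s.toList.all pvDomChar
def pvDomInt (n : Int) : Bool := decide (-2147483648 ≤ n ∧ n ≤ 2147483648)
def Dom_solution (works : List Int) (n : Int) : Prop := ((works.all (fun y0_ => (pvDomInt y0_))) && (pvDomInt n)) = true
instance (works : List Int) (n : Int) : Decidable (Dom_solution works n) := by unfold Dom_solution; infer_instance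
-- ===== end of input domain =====

-- B replaces A's n repeated max-scans by a binary search on the final reduction level;
-- equivalence is about the RETURN value only: A mutates `works` in place, B does not.


-- ===== PORT A =====
-- loop body of A: maxV = max(works); idx = works.index(maxV); works[idx] -= 1
def solutionStep (ws : List Int) : List Int :=
  let maxV := (PySem.List.max? ws (fun x => x)).getD 0
  let idx := ((PySem.List.index? ws maxV).getD 0 : Nat)
  PySem.List.pySetD ws (idx : Int) (PySem.List.pyGetD ws (idx : Int) 0 - 1)

def solution (works : List Int) (n : Int) : Int :=
  if works.sum ≤ n then 0
  else
    let ws := (PySem.List.pyRange 0 n 1).foldl (fun ws _ => solutionStep ws) works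
    (ws.map (fun i => i ^ 2)).sum

-- ===== PORT B =====
-- sum(w - t for w in works if w > t): decrements needed to bring every element down to ≤ t
def altCost (ws : List Int) (t : Int) : Int :=
  ((ws.filter (fun w => decide (t < w))).map (fun w => w - t)).sum

-- the while-loop of Source B: first t in [lo, hi] with altCost ws t ≤ n
def altSearch (ws : List Int) (n : Int) (lo hi : Int) : Int :=
  if lo < hi then
    if altCost ws (PySem.Int.floordiv (lo + hi) 2) ≤ n then
      altSearch ws n lo (PySem.Int.floordiv (lo + hi) 2)
    else
      altSearch ws n (PySem.Int.floordiv (lo + hi) 2 + 1) hi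
  else lo
termination_by (hi - lo).toNat
decreasing_by
  · rw [PySem.Int.floordiv_eq_ediv_of_pos (by norm_num)]; omega
  · rw [PySem.Int.floordiv_eq_ediv_of_pos (by norm_num)]; omega

def solution_alt (works : List Int) (n : Int) : Int :=
  if works.sum ≤ n then 0
  else if n ≤ 0 then (works.map (fun w => w * w)).sum
  else
    let hi := (PySem.List.max? works (fun x => x)).getD 0
    let t := altSearch works n (hi - n) hi
    let r := n - altCost works t
    let c := ((works.filter (fun w => decide (t ≤ w))).map (fun _ => (1 : Int))).sum
    ((works.filter (fun w => decide (w < t))).map (fun w => w * w)).sum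
      + (c - r) * t * t + r * (t - 1) * (t - 1)

-- ===== PRECONDITION & SPEC =====
def Spec_solution (works : List Int) (n : Int) (out : Int) : Prop := out = solution_alt works n
instance (works : List Int) (n : Int) (out : Int) : Decidable (Spec_solution works n out) := by unfold Spec_solution; infer_instance

-- ===== CLAIM (what is proved, stated in full; the proofs are below) =====
def Claim_equal_solution : Prop := ∀ (works : List Int) (n : Int), Dom_solution works n → Spec_solution works n (solution works n)

-- ===== LEMMAS AND PROOFS =====

-- number of elements ≥ t
def pvCnt (ws : List Int) (t : Int) : Nat := (ws.filter (fun w => decide (t ≤ w))).length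

-- the list after k reductions, as a reference multiset (up to permutation)
def pvTarget (ws : List Int) (t : Int) (r : Nat) : List Int :=
  ws.filter (fun w => decide (w < t)) ++ List.replicate (pvCnt ws t - r) t ++ List.replicate r (t - 1)

theorem pvCost_cons (w : Int) (ws : List Int) (t : Int) :
    altCost (w :: ws) t = (if t < w then w - t else 0) + altCost ws t := by
  simp only [altCost, List.filter_cons]
  split <;> rename_i h <;> simp only [decide_eq_true_eq] at h <;> simp [h]

theorem pvCnt_cons (w : Int) (ws : List Int) (t : Int) :
    pvCnt (w :: ws) t = (if t ≤ w then 1 else 0) + pvCnt ws t := by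
  simp only [pvCnt, List.filter_cons]
  split <;> rename_i h <;> simp only [decide_eq_true_eq] at h <;> simp [h] <;> omega

theorem pvCost_nonneg (ws : List Int) (t : Int) : 0 ≤ altCost ws t := by
  induction ws with
  | nil => simp [altCost]
  | cons w ws ih => rw [pvCost_cons]; split <;> omega

theorem pvCost_succ (ws : List Int) (t : Int) :
    altCost ws (t - 1) = altCost ws t + (pvCnt ws t : Int) := by
  induction ws with
  | nil => simp [altCost, pvCnt]
  | cons w ws ih =>
    rw [pvCost_cons, pvCost_cons, pvCnt_cons]
    split <;> split <;> split <;> push_cast <;> omega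

theorem pvCnt_succ (ws : List Int) (t : Int) :
    pvCnt ws t = pvCnt ws (t + 1) + ws.count t := by
  induction ws with
  | nil => simp [pvCnt]
  | cons w ws ih =>
    rw [pvCnt_cons, pvCnt_cons, List.count_cons]
    by_cases hw : w = t <;> split <;> split <;> simp_all <;> omega

theorem pvCost_mem_le (ws : List Int) (t x : Int) (hx : x ∈ ws) (hlt : t < x) :
    x - t ≤ altCost ws t := by
  apply List.single_le_sum
  · intro y hy
    obtain ⟨w, hw, rfl⟩ := List.mem_map.mp hy
    have := (List.mem_filter.mp hw).2
    simp only [decide_eq_true_eq] at this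
    omega
  · exact List.mem_map.mpr ⟨x, List.mem_filter.mpr ⟨hx, by simpa using hlt⟩, rfl⟩

theorem pvCost_eq_zero (ws : List Int) (t : Int) (h : ∀ x ∈ ws, x ≤ t) :
    altCost ws t = 0 := by
  have : ws.filter (fun w => decide (t < w)) = [] := by
    apply List.filter_eq_nil_iff.mpr
    intro x hx
    simpa using not_lt.mpr (h x hx)
  simp [altCost, this]

theorem pvCost_pos_exists (ws : List Int) (t : Int) (h : 0 < altCost ws t) :
    ∃ x ∈ ws, t < x := by
  by_contra hc
  push_neg at hc
  have := pvCost_eq_zero ws t hc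
  omega

theorem pvCount_filter (l : List Int) (a : Int) (p : Int → Bool) :
    (l.filter p).count a = if p a then l.count a else 0 := by
  induction l with
  | nil => simp
  | cons h t ih =>
    by_cases hpa : p a <;> by_cases hh : h = a <;>
      simp_all [List.filter_cons] <;> split <;> simp_all

theorem pvCount_replicate (n : Nat) (a b : Int) :
    (List.replicate n a).count b = if b = a then n else 0 := by
  rw [List.count_replicate]; simp only [beq_iff_eq]; split <;> split <;> simp_all

theorem pvCount_target (ws : List Int) (t : Int) (r : Nat) (x : Int) :
    (pvTarget ws t r).count x =
      (if x < t then ws.count x else 0) + (if x = t then pvCnt ws t - r else 0)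
        + (if x = t - 1 then r else 0) := by
  simp only [pvTarget, List.count_append, pvCount_filter, pvCount_replicate,
    decide_eq_true_eq]

theorem pvSet_perm (M : List Int) (k : Nat) (t x : Int) (hk : k < M.length)
    (ht : M[k] = t) (hf : ∀ j, (hj : j < k) → M[j]'(by omega) ≠ t) :
    (M.set k x).Perm (x :: M.erase t) := by
  induction M generalizing k with
  | nil => simp at hk
  | cons a tl ih =>
    cases k with
    | zero =>
      simp only [List.getElem_cons_zero] at ht
      subst ht
      simp [List.erase_cons]
    | succ k =>
      have ha : a ≠ t := by
        have := hf 0 (by omega)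
        simpa using this
      have ih' := ih k (by simpa using hk) (by simpa using ht)
        (fun j hj => by simpa using hf (j + 1) (by omega))
      simp only [List.set_cons_succ, List.erase_cons, beq_iff_eq, ha, if_neg]
      exact (ih'.cons a).trans (List.Perm.swap x a _)

theorem pvStep_perm (M : List Int) (t : Int)
    (hm : PySem.List.max? M (fun x => x) = some t) :
    (solutionStep M).Perm ((t - 1) :: M.erase t) := by
  have hmem : t ∈ M := PySem.List.max?_mem hm
  have hns : PySem.List.index? M t ≠ none := fun h =>
    ((PySem.List.index?_eq_none_iff M t).mp h) hmem
  obtain ⟨k, hk⟩ := Option.ne_none_iff_exists'.mp hns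
  obtain ⟨hklen, hget, hfirst⟩ := PySem.List.getElem_of_index?_eq_some hk
  show (PySem.List.pySetD M (((PySem.List.index? M ((PySem.List.max? M (fun x => x)).getD 0)).getD 0 : Nat) : Int)
      (PySem.List.pyGetD M (((PySem.List.index? M ((PySem.List.max? M (fun x => x)).getD 0)).getD 0 : Nat) : Int) 0 - 1)).Perm
    ((t - 1) :: M.erase t)
  rw [hm]
  simp only [Option.getD_some]
  rw [hk]
  simp only [Option.getD_some]
  rw [PySem.List.pySetD_natCast]
  have hgetD : PySem.List.pyGetD M (k : Int) 0 = t := by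
    rw [PySem.List.pyGetD_natCast, List.getD_eq_getElem?_getD, List.getElem?_eq_getElem hklen, hget]
    rfl
  rw [hgetD]
  exact pvSet_perm M k t (t - 1) hklen hget hfirst

theorem pvMax_of_counts (M : List Int) (t : Int)
    (hmem : t ∈ M) (hub : ∀ x ∈ M, x ≤ t) :
    PySem.List.max? M (fun x => x) = some t := by
  cases hM : PySem.List.max? M (fun x => x) with
  | none =>
    rw [PySem.List.max?_eq_none_iff] at hM
    subst hM; simp at hmem
  | some m =>
    have h1 : m ∈ M := PySem.List.max?_mem hM
    have h2 : t ≤ m := PySem.List.max?_isMax hM t hmem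
    have h3 : m ≤ t := hub m h1
    have : m = t := le_antisymm h3 h2
    rw [this]

theorem pvCnt_pos_of_mem (ws : List Int) (x t : Int) (hx : x ∈ ws) (h : t ≤ x) :
    1 ≤ pvCnt ws t := by
  have hm : x ∈ ws.filter (fun w => decide (t ≤ w)) :=
    List.mem_filter.mpr ⟨hx, by simpa using h⟩
  have hp := List.length_pos_of_mem hm
  unfold pvCnt
  omega

theorem pvCount_eq_cnt (ws : List Int) (t : Int) (h : ∀ x ∈ ws, x ≤ t) :
    ws.count t = pvCnt ws t := by
  induction ws with
  | nil => simp [pvCnt]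
  | cons w ws ih =>
    have hw := h w (by simp)
    have ih' := ih (fun x hx => h x (by simp [hx]))
    rw [List.count_cons, pvCnt_cons]
    rcases eq_or_ne w t with rfl | hwt
    · simp
      omega
    · have hle : ¬ t ≤ w := by omega
      simp [hwt, Ne.symm hwt, hle]
      omega

theorem pvInv (ws : List Int) (k : Nat) (t : Int) (r : Nat)
    (h1 : altCost ws t ≤ (k : Int)) (h2 : (k : Int) < altCost ws (t - 1))
    (hr : (r : Int) = (k : Int) - altCost ws t) :
    (solutionStep^[k] ws).Perm (pvTarget ws t r) := by
  induction k generalizing t r with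
  | zero =>
    rw [Function.iterate_zero_apply]
    have hc0 : altCost ws t = 0 := le_antisymm (by exact_mod_cast h1) (pvCost_nonneg ws t)
    have hr0 : r = 0 := by
      have h : (r : Int) = 0 := by omega
      exact_mod_cast h
    subst hr0
    have hub : ∀ x ∈ ws, x ≤ t := by
      intro x hx
      by_contra hgt
      have h3 := pvCost_mem_le ws t x hx (by omega)
      omega
    rw [List.perm_iff_count]
    intro x
    rw [pvCount_target]
    rcases eq_or_ne x t with rfl | hxt
    · have hq := pvCount_eq_cnt ws x hub
      split_ifs <;> omega
    · by_cases hlt : x < t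
      · split_ifs <;> omega
      · have hz : ws.count x = 0 :=
          List.count_eq_zero.mpr (fun hm => by have := hub x hm; omega)
        split_ifs <;> omega
  | succ k ih =>
    have hcast : ((k + 1 : Nat) : Int) = (k : Int) + 1 := by push_cast; ring
    rw [hcast] at h1 h2 hr
    rw [Function.iterate_succ_apply']
    by_cases hA : altCost ws t ≤ (k : Int)
    · -- the level stays t; one more element drops from t to t - 1
      have hrpos : 1 ≤ r := by
        have h : (1 : Int) ≤ (r : Int) := by omega
        exact_mod_cast h
      have hrsub : ((r - 1 : Nat) : Int) = (r : Int) - 1 := by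
        rw [Nat.cast_sub hrpos]; push_cast; ring
      have hIH := ih t (r - 1) hA (by omega) (by omega)
      have hrcnt : r < pvCnt ws t := by
        have hs := pvCost_succ ws t
        have h : (r : Int) < (pvCnt ws t : Int) := by omega
        exact_mod_cast h
      have hmem : t ∈ solutionStep^[k] ws := by
        rw [hIH.mem_iff]
        refine List.mem_append.mpr (Or.inl (List.mem_append.mpr (Or.inr ?_)))
        rw [List.mem_replicate]
        exact ⟨by omega, rfl⟩
      have hub : ∀ x ∈ solutionStep^[k] ws, x ≤ t := by
        intro x hx
        rw [hIH.mem_iff] at hx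
        simp only [pvTarget, List.mem_append, List.mem_filter, List.mem_replicate,
          decide_eq_true_eq] at hx
        rcases hx with (⟨hm, hlt⟩ | ⟨_, rfl⟩) | ⟨_, rfl⟩ <;> omega
      have hmax := pvMax_of_counts _ t hmem hub
      refine (pvStep_perm _ t hmax).trans ?_
      rw [List.perm_iff_count]
      intro x
      have hq := List.perm_iff_count.mp hIH
      rw [pvCount_target]
      rcases eq_or_ne x t with rfl | hxt
      · rw [List.count_cons, List.count_erase_self, hq x, pvCount_target]
        simp only [beq_iff_eq]
        split_ifs <;> omega
      · rw [List.count_cons, List.count_erase_of_ne hxt, hq x, pvCount_target]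
        simp only [beq_iff_eq]
        split_ifs <;> omega
    · -- every element at level t has been hit: the previous level was t + 1
      have hc1 : altCost ws t = (k : Int) + 1 := by omega
      have hr0 : r = 0 := by
        have h : (r : Int) = 0 := by omega
        exact_mod_cast h
      subst hr0
      obtain ⟨y, hy, hyt⟩ := pvCost_pos_exists ws t (by omega)
      have hcntpos : 1 ≤ pvCnt ws (t + 1) := pvCnt_pos_of_mem ws y (t + 1) hy (by omega)
      have hcntposI : (1 : Int) ≤ (pvCnt ws (t + 1) : Int) := by exact_mod_cast hcntpos
      have hsucc : altCost ws t = altCost ws (t + 1) + (pvCnt ws (t + 1) : Int) := by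
        have h := pvCost_succ ws (t + 1)
        rw [show t + 1 - 1 = t from by ring] at h
        exact h
      have hr1 : ((pvCnt ws (t + 1) - 1 : Nat) : Int) = (k : Int) - altCost ws (t + 1) := by
        rw [Nat.cast_sub hcntpos]; push_cast; omega
      have hIH := ih (t + 1) (pvCnt ws (t + 1) - 1) (by omega)
        (by rw [show t + 1 - 1 = t from by ring]; omega) hr1
      have hmem : t + 1 ∈ solutionStep^[k] ws := by
        rw [hIH.mem_iff]
        refine List.mem_append.mpr (Or.inl (List.mem_append.mpr (Or.inr ?_)))
        rw [List.mem_replicate]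
        exact ⟨by omega, rfl⟩
      have hub : ∀ x ∈ solutionStep^[k] ws, x ≤ t + 1 := by
        intro x hx
        rw [hIH.mem_iff] at hx
        simp only [pvTarget, List.mem_append, List.mem_filter, List.mem_replicate,
          decide_eq_true_eq] at hx
        rcases hx with (⟨hm, hlt⟩ | ⟨_, rfl⟩) | ⟨_, rfl⟩ <;> omega
      have hmax := pvMax_of_counts _ (t + 1) hmem hub
      have hstep := pvStep_perm _ (t + 1) hmax
      rw [show t + 1 - 1 = t from by ring] at hstep
      refine hstep.trans ?_
      rw [List.perm_iff_count]
      intro x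
      have hq := List.perm_iff_count.mp hIH
      have hcc := pvCnt_succ ws t
      rw [pvCount_target]
      rcases eq_or_ne x (t + 1) with rfl | hx1
      · rw [List.count_cons, List.count_erase_self, hq (t + 1), pvCount_target]
        simp only [beq_iff_eq]
        split_ifs <;> omega
      · rcases eq_or_ne x t with rfl | hx2
        · rw [List.count_cons, List.count_erase_of_ne hx1, hq x, pvCount_target]
          simp only [beq_iff_eq]
          split_ifs <;> omega
        · rw [List.count_cons, List.count_erase_of_ne hx1, hq x, pvCount_target]
          simp only [beq_iff_eq]
          by_cases hlt : x < t
          · split_ifs <;> omega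
          · have hz3 : x ≠ t - 1 := by omega
            split_ifs <;> omega

theorem pvFold_eq_iterate (L : List Int) (x : List Int) :
    L.foldl (fun ws _ => solutionStep ws) x = solutionStep^[L.length] x := by
  induction L generalizing x with
  | nil => rfl
  | cons a L ih => simp [List.foldl_cons, ih, Function.iterate_succ_apply]

theorem pvSearch_spec (ws : List Int) (n lo hi : Int) (hle : lo ≤ hi)
    (hhi : altCost ws hi ≤ n) (hlo : n < altCost ws (lo - 1)) :
    altCost ws (altSearch ws n lo hi) ≤ n ∧
      n < altCost ws (altSearch ws n lo hi - 1) := by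
  revert hle hhi hlo
  induction lo, hi using altSearch.induct (ws := ws) (n := n) with
  | case1 lo hi hlt hc ih =>
    intro hle hhi hlo
    rw [altSearch, if_pos hlt, if_pos hc]
    have hb := PySem.Int.floordiv_eq_ediv_of_pos (a := lo + hi) (b := 2) (by norm_num)
    exact ih (by rw [hb]; omega) hc hlo
  | case2 lo hi hlt hc ih =>
    intro hle hhi hlo
    rw [altSearch, if_pos hlt, if_neg hc]
    have hb := PySem.Int.floordiv_eq_ediv_of_pos (a := lo + hi) (b := 2) (by norm_num)
    refine ih (by rw [hb]; omega) hhi ?_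
    have he : PySem.Int.floordiv (lo + hi) 2 + 1 - 1 = PySem.Int.floordiv (lo + hi) 2 := by ring
    rw [he]
    push_neg at hc
    omega
  | case3 lo hi hlt =>
    intro hle hhi hlo
    have heq : lo = hi := by omega
    rw [altSearch, if_neg hlt]
    subst heq
    exact ⟨hhi, hlo⟩

-- ===== VERDICT (by name: the statement is the Claim_ definition above) =====
theorem solution_spec : Claim_equal_solution := by
  unfold Claim_equal_solution Spec_solution
  intro works n _
  unfold solution solution_alt
  by_cases hs : works.sum ≤ n
  · rw [if_pos hs, if_pos hs]
  · rw [if_neg hs, if_neg hs]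
    have hmap : (fun i : Int => i ^ 2) = fun w : Int => w * w := by funext w; ring
    by_cases hn : n ≤ 0
    · rw [if_pos hn, PySem.List.pyRange_one_eq_nil hn]
      simp only [List.foldl_nil]
      rw [hmap]
    · rw [if_neg hn]
      have hn1 : 1 ≤ n := by omega
      have hne : works ≠ [] := by
        intro h
        rw [h] at hs
        simp at hs
        omega
      obtain ⟨m, hm⟩ : ∃ m, PySem.List.max? works (fun x => x) = some m := by
        cases hmx : PySem.List.max? works (fun x => x) with
        | none => exact absurd ((PySem.List.max?_eq_none_iff works _).mp hmx) hne
        | some m => exact ⟨m, rfl⟩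
      have hmmem : m ∈ works := PySem.List.max?_mem hm
      have hcost_hi : altCost works m = 0 :=
        pvCost_eq_zero works m (fun x hx => PySem.List.max?_isMax hm x hx)
      have hcost_lo : n < altCost works (m - n - 1) := by
        have h := pvCost_mem_le works (m - n - 1) m hmmem (by omega)
        omega
      obtain ⟨ht1, ht2⟩ := pvSearch_spec works n (m - n) m (by omega) (by omega) hcost_lo
      have hrnn : 0 ≤ n - altCost works (altSearch works n (m - n) m) := by omega
      have hkn : ((n.toNat : Nat) : Int) = n := Int.toNat_of_nonneg (by omega)
      have hrq : (((n - altCost works (altSearch works n (m - n) m)).toNat : Nat) : Int)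
          = n - altCost works (altSearch works n (m - n) m) := Int.toNat_of_nonneg hrnn
      have hperm := pvInv works n.toNat (altSearch works n (m - n) m)
        (n - altCost works (altSearch works n (m - n) m)).toNat
        (by rw [hkn]; omega) (by rw [hkn]; omega) (by rw [hrq, hkn])
      have hA : (((PySem.List.pyRange 0 n 1).foldl (fun ws _ => solutionStep ws) works).map
            (fun i => i ^ 2)).sum
          = ((solutionStep^[n.toNat] works).map (fun i => i ^ 2)).sum := by
        rw [pvFold_eq_iterate, PySem.List.length_pyRange_one,
          show n - 0 = n from by ring]
      show (((PySem.List.pyRange 0 n 1).foldl (fun ws _ => solutionStep ws) works).map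
            (fun i => i ^ 2)).sum = _
      have hgd : (PySem.List.max? works (fun x => x)).getD 0 = m := by rw [hm]; rfl
      rw [hA, (hperm.map (fun i => i ^ 2)).sum_eq, hgd]
      have hrltcnt : n - altCost works (altSearch works n (m - n) m)
          < (pvCnt works (altSearch works n (m - n) m) : Int) := by
        have h := pvCost_succ works (altSearch works n (m - n) m)
        omega
      have hrle : (n - altCost works (altSearch works n (m - n) m)).toNat
          ≤ pvCnt works (altSearch works n (m - n) m) := by
        have : ((pvCnt works (altSearch works n (m - n) m) : Nat) : Int)
            = (pvCnt works (altSearch works n (m - n) m) : Int) := rfl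
        omega
      have hcnt_def : (works.filter (fun w => decide (altSearch works n (m - n) m ≤ w))).length
          = pvCnt works (altSearch works n (m - n) m) := rfl
      rw [pvTarget]
      simp only [List.map_append, List.sum_append, List.map_replicate, List.sum_replicate,
        nsmul_eq_mul, List.map_const', hmap]
      rw [hcnt_def, Nat.cast_sub hrle, hrq]
      ring
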